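-- pv_equiv track=rewrite | github.com/omegaup/ofmi-archive | 2024/dia-2/ofmi-2024-inventario/case-generator.py | get_limite_de_valores_distintos
-- ===== SOURCE A (Python) =====
-- def get_limite_de_valores_distintos(N, M):
--     limite_nm = min(N, M)
--     limite_suma = 10**5
--     for i in range(1, limite_nm + 1):
--         if i > limite_suma:
--             return i - 1
--         limite_suma -= i
--     return limite_nm
-- ===== SOURCE B (Python) =====
-- def get_limite_de_valores_distintos(N, M):
--     # Closed form: the loop stops at the first i with i*(i+1)//2 > 10**5,
--     # returning i-1; the largest k with k*(k+1)//2 <= 10**5 is k = 446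
--     # (446*447//2 = 99681 <= 100000 < 100128 = 447*448//2), capped by min(N, M).
--     return min(N, M, 446)
-- ===== Notes on version B (the rewrite author's own statement) =====
-- stated objective: simpler
-- what changed: Replaced the counting loop by a closed-form answer: min(N, M, 446), where 446 is the largest k with k*(k+1)/2 <= 10**5.
import Mathlib
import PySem

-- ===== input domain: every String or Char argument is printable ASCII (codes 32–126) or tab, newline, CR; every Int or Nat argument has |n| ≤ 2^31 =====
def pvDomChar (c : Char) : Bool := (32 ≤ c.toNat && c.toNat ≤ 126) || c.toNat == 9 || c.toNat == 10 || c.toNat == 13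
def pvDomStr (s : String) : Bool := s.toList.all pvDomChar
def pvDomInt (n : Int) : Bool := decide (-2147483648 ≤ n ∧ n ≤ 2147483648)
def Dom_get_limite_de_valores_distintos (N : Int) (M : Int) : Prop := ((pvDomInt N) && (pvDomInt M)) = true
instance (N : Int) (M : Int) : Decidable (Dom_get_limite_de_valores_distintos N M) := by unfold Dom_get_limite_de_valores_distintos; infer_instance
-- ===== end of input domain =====

-- B replaces A's counting loop by the closed form min(N, M, 446); objective: simpler.

-- ===== PORT A =====
-- the 'for i in range(...)' loop with early return, state = limite_suma
def pvLoopA : List Int → Int → Option Int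
  | [], _ => none
  | i :: rest, s => if i > s then some (i - 1) else pvLoopA rest (s - i)

def get_limite_de_valores_distintos (N : Int) (M : Int) : Int :=
  let limite_nm := min N M
  match pvLoopA (PySem.List.pyRange 1 (limite_nm + 1) 1) ((10:Int)^5) with
  | some r => r
  | none => limite_nm

-- ===== PORT B =====
def get_limite_de_valores_distintos_alt (N : Int) (M : Int) : Int :=
  min (min N M) 446

-- ===== PRECONDITION & SPEC =====
def Spec_get_limite_de_valores_distintos (N : Int) (M : Int) (out : Int) : Prop := out = get_limite_de_valores_distintos_alt N M
instance (N : Int) (M : Int) (out : Int) : Decidable (Spec_get_limite_de_valores_distintos N M out) := by unfold Spec_get_limite_de_valores_distintos; infer_instance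

-- ===== CLAIM (what is proved, stated in full; the proofs are below) =====
def Claim_equal_get_limite_de_valores_distintos : Prop := ∀ (N : Int) (M : Int), Dom_get_limite_de_valores_distintos N M → Spec_get_limite_de_valores_distintos N M (get_limite_de_valores_distintos N M)

-- ===== LEMMAS AND PROOFS =====

theorem pvLoopA_append (xs ys : List Int) (s : Int) :
    pvLoopA (xs ++ ys) s =
      match pvLoopA xs s with
      | some r => some r
      | none => pvLoopA ys (s - xs.sum) := by
  induction xs generalizing s with
  | nil => simp [pvLoopA]
  | cons a t ih =>
      simp only [List.cons_append, pvLoopA]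
      split_ifs with h
      · rfl
      · rw [ih]
        have : s - a - t.sum = s - (a :: t).sum := by simp; ring
        rw [this]

theorem pvLoopA_mem (xs : List Int) (s r : Int) (h : pvLoopA xs s = some r) :
    r + 1 ∈ xs := by
  induction xs generalizing s with
  | nil => simp [pvLoopA] at h
  | cons a t ih =>
      simp only [pvLoopA] at h
      split_ifs at h with hc
      · simp at h
        exact List.mem_cons.mpr (Or.inl (by omega))
      · right; exact ih _ h

set_option maxRecDepth 100000 in
theorem pvLoopA_full : pvLoopA (PySem.List.pyRange 1 448 1) ((10:Int)^5) = some 446 := by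
  decide

theorem get_limite_de_valores_distintos_spec : Claim_equal_get_limite_de_valores_distintos := by
  intro N M _
  unfold Spec_get_limite_de_valores_distintos get_limite_de_valores_distintos get_limite_de_valores_distintos_alt
  set n := min N M with hn
  show (match pvLoopA (PySem.List.pyRange 1 (n + 1) 1) ((10:Int)^5) with
        | some r => r
        | none => n) = min n 446
  clear_value n
  clear hn
  by_cases hneg : n + 1 ≤ 1
  · rw [PySem.List.pyRange_one_eq_nil hneg]
    simp [pvLoopA]
    omega
  · by_cases hbig : (448:Int) ≤ n + 1
    · -- n ≥ 447: loop exits at i = 447 with 446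
      rw [PySem.List.pyRange_one_append 1 448 (n+1) (by omega) hbig,
          pvLoopA_append, pvLoopA_full]
      simp
      omega
    · -- 0 ≤ n ≤ 446: loop falls through, returns n
      have h1 : (1:Int) ≤ n + 1 := by omega
      have h2 : n + 1 ≤ 448 := by omega
      have hsplit := PySem.List.pyRange_one_append 1 (n+1) 448 h1 h2
      have hfull := pvLoopA_full
      rw [hsplit, pvLoopA_append] at hfull
      cases hpref : pvLoopA (PySem.List.pyRange 1 (n+1) 1) ((10:Int)^5) with
      | some r =>
          rw [hpref] at hfull
          have hr : r = 446 := by simpa using hfull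
          have := pvLoopA_mem _ _ _ hpref
          rw [PySem.List.mem_pyRange_one] at this
          omega
      | none =>
          show n = min n 446
          omega

-- ===== VERDICT (by name: the statement is the Claim_ definition above) =====
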